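-- pv_equiv track=rewrite | github.com/cwb14/synLTR | module2/ltrharvest5.py | has_exclude_run_char
-- ===== SOURCE A (Python) =====
-- def has_exclude_run_char(seq: str, char: str, min_run: int = 10) -> bool:
--     """
--     Returns True if seq contains a run of `char` of length >= min_run anywhere.
--     Case-insensitive. Used to EXCLUDE candidates containing such a run.
--     """
--     char = char.upper()
--     s = seq.upper()
--     count = 0
--     for c in s:
--         if c == char:
--             count += 1
--             if count >= min_run:
--                 return True
--         else:
--             count = 0
--     return False
-- ===== SOURCE B (Python) =====
-- def has_exclude_run_char(seq: str, char: str, min_run: int = 10) -> bool: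
--     # Run-length decomposition: scan maximal runs of identical characters with
--     # two indices and test each whole run at once, instead of a running counter.
--     c = char.upper()
--     s = seq.upper()
--     i = 0
--     n = len(s)
--     while i < n:
--         j = i + 1
--         while j < n and s[j] == s[i]:
--             j += 1
--         if s[i] == c and j - i >= min_run:
--             return True
--         i = j
--     return False
-- ===== Notes on version B (the rewrite author's own statement) =====
-- stated objective: alternative
-- what changed: Replaces the per-character running counter (reset on mismatch) with a two-index scan over maximal runs of identical characters, testing each whole run's length at once.
import Mathlib
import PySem

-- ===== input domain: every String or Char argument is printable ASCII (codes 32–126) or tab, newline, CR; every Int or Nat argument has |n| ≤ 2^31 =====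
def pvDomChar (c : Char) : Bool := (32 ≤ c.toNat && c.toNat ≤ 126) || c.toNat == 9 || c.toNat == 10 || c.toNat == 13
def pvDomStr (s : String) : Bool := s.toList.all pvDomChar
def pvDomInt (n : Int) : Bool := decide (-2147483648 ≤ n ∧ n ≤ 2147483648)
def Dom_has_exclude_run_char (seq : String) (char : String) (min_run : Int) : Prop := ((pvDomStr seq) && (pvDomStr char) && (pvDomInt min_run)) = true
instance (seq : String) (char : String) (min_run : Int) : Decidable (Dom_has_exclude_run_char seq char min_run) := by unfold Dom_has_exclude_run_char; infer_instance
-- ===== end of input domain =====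

-- B replaces A's per-character running counter with a two-index scan over maximal
-- runs of identical characters (an 'alternative' decomposition, same cost).

-- ===== PORT A =====
-- the `for c in s` loop with the running counter; early `return True` = returning true
def pvA_loop (charU : String) (min_run : Int) : List Char → Int → Bool
  | [], _ => false
  | c :: rest, count =>
    if String.ofList [c] = charU then
      if count + 1 ≥ min_run then true
      else pvA_loop charU min_run rest (count + 1)
    else pvA_loop charU min_run rest 0

def has_exclude_run_char (seq : String) (char : String) (min_run : Int) : Bool :=
  pvA_loop (PySem.Str.upper char) min_run (PySem.Str.upper seq).toList 0

-- ===== PORT B =====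
-- the inner `while j < n and s[j] == s[i]` loop: returns (j - i - 1, remaining suffix)
def pvB_runSplit (x : Char) : List Char → Nat × List Char
  | [] => (0, [])
  | y :: ys =>
    if y = x then
      let p := pvB_runSplit x ys
      (p.1 + 1, p.2)
    else (0, y :: ys)

theorem pvB_runSplit_length (x : Char) (l : List Char) :
    (pvB_runSplit x l).2.length ≤ l.length := by
  induction l with
  | nil => simp [pvB_runSplit]
  | cons y ys ih =>
    simp only [pvB_runSplit]
    split
    · simpa using Nat.le_succ_of_le ih
    · simp

-- the outer `while i < n` loop of Source B
def pvB_loop (charU : String) (min_run : Int) : List Char → Bool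
  | [] => false
  | x :: xs =>
    if String.ofList [x] = charU ∧ (1 + ((pvB_runSplit x xs).1 : Int) ≥ min_run) then true
    else pvB_loop charU min_run (pvB_runSplit x xs).2
  termination_by l => l.length
  decreasing_by simpa using Nat.lt_succ_of_le (pvB_runSplit_length x xs)

def has_exclude_run_char_alt (seq : String) (char : String) (min_run : Int) : Bool :=
  pvB_loop (PySem.Str.upper char) min_run (PySem.Str.upper seq).toList

-- ===== PRECONDITION & SPEC =====
def Spec_has_exclude_run_char (seq : String) (char : String) (min_run : Int) (out : Bool) : Prop := out = has_exclude_run_char_alt seq char min_run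
instance (seq : String) (char : String) (min_run : Int) (out : Bool) : Decidable (Spec_has_exclude_run_char seq char min_run out) := by unfold Spec_has_exclude_run_char; infer_instance

-- ===== CLAIM (what is proved, stated in full; the proofs are below) =====
def Claim_equal_has_exclude_run_char : Prop := ∀ (seq : String) (char : String) (min_run : Int), Dom_has_exclude_run_char seq char min_run → Spec_has_exclude_run_char seq char min_run (has_exclude_run_char seq char min_run)

-- ===== LEMMAS AND PROOFS =====

-- the suffix returned by pvB_runSplit does not start with x
theorem pvB_runSplit_head (x : Char) (l : List Char) (y : Char) (r : List Char)
    (h : (pvB_runSplit x l).2 = y :: r) : y ≠ x := by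
  induction l with
  | nil => simp [pvB_runSplit] at h
  | cons z zs ih =>
    simp only [pvB_runSplit] at h
    by_cases hz : z = x
    · simp [hz] at h; exact ih h
    · simp [hz] at h; rw [← h.1]; exact hz

-- a counter is irrelevant when the list is empty or its head does not match
theorem pvA_count_irrel (charU : String) (m : Int) (l : List Char)
    (h : ∀ y r, l = y :: r → String.ofList [y] ≠ charU) (c : Int) :
    pvA_loop charU m l c = pvA_loop charU m l 0 := by
  cases l with
  | nil => simp [pvA_loop]
  | cons y r =>
    have hy := h y r rfl
    simp [pvA_loop, hy]

-- dropping a run of a non-matching character does not change A's result (counter 0)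
theorem pvA_dropRun (charU : String) (m : Int) (x : Char)
    (hx : String.ofList [x] ≠ charU) :
    ∀ l : List Char, pvA_loop charU m l 0 = pvA_loop charU m (pvB_runSplit x l).2 0 := by
  intro l
  induction l with
  | nil => simp [pvB_runSplit]
  | cons y ys ih =>
    by_cases hy : y = x
    · subst hy
      simp only [pvB_runSplit]
      rw [pvA_loop, if_neg hx]
      exact ih
    · simp [pvB_runSplit, hy]

-- scanning a maximal run of the matching character x starting at counter `count`
theorem pvA_run (charU : String) (m : Int) (x : Char)
    (hx : String.ofList [x] = charU) :
    ∀ (l : List Char) (count : Int),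
      pvA_loop charU m (x :: l) count =
        if count + 1 + ((pvB_runSplit x l).1 : Int) ≥ m then true
        else pvA_loop charU m (pvB_runSplit x l).2 (count + 1 + ((pvB_runSplit x l).1 : Int)) := by
  intro l
  induction l with
  | nil =>
    intro count
    simp only [pvB_runSplit, pvA_loop, if_pos hx, Nat.cast_zero, add_zero]
  | cons y ys ih =>
    intro count
    by_cases hy : y = x
    · subst hy
      simp only [pvB_runSplit]
      rw [pvA_loop, if_pos hx, ih (count + 1)]
      push_cast
      split_ifs <;> first | rfl | omega | (congr 1 <;> omega)
    · have hyc : String.ofList [y] ≠ charU := by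
        intro hc
        rw [← hx] at hc
        have : y = x := by simpa using congrArg String.toList hc
        exact hy this
      simp only [pvB_runSplit, if_neg hy]
      rw [pvA_loop, if_pos hx]
      simp only [Nat.cast_zero, add_zero]

-- main loop equivalence, by strong induction on the list length
theorem pvMain (charU : String) (m : Int) :
    ∀ (n : Nat) (l : List Char), l.length ≤ n →
      pvA_loop charU m l 0 = pvB_loop charU m l := by
  intro n
  induction n with
  | zero =>
    intro l h
    have : l = [] := by cases l <;> simp_all
    subst this
    simp [pvA_loop, pvB_loop]
  | succ n ih =>
    intro l h
    cases l with
    | nil => simp [pvA_loop, pvB_loop]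
    | cons x xs =>
      rw [pvB_loop]
      have hrest : (pvB_runSplit x xs).2.length ≤ n := by
        have := pvB_runSplit_length x xs
        simp at h
        omega
      by_cases hx : String.ofList [x] = charU
      · rw [pvA_run charU m x hx xs 0]
        by_cases hge : (1 : Int) + ((pvB_runSplit x xs).1 : Int) ≥ m
        · rw [if_pos (by omega), if_pos ⟨hx, hge⟩]
        · rw [if_neg (by omega), if_neg (by intro hc; exact hge hc.2)]
          rw [pvA_count_irrel charU m _ ?side]
          · exact ih _ hrest
          · intro y r hyr hyc
            have hne := pvB_runSplit_head x xs y r hyr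
            rw [← hx] at hyc
            have : y = x := by simpa using congrArg String.toList hyc
            exact hne this
      · rw [if_neg (by intro hc; exact hx hc.1)]
        rw [pvA_loop, if_neg hx]
        rw [pvA_dropRun charU m x hx xs]
        exact ih _ hrest

-- ===== VERDICT (by name: the statement is the Claim_ definition above) =====
theorem has_exclude_run_char_spec : Claim_equal_has_exclude_run_char := by
  intro seq char min_run _
  unfold Spec_has_exclude_run_char has_exclude_run_char has_exclude_run_char_alt
  exact pvMain _ _ _ _ le_rfl
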